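-- pv_equiv track=rewrite | github.com/anujkumar-m/leetcode | 0648-replace-words/0648-replace-words.py | replaceWords
-- ===== SOURCE A (Python) =====
-- def replaceWords(d, s):
--     """
--     :type dictionary: List[str]
--     :type sentence: str
--     :rtype: str
--     """
--     d=sorted(d,key=len)
--     s=s.split()
--     for i in range(len(s)):
--         for j in d:
--             if s[i].startswith(j):
--                 s[i]=j
--     return ' '.join(s)
-- ===== SOURCE B (Python) =====
-- def replaceWords(d, s):
--     roots = set(d)
--     lengths = sorted({len(r) for r in d})
--     out = []
--     for w in s.split():
--         for L in lengths:
--             if L > len(w):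
--                 break
--             p = w[:L]
--             if p in roots:
--                 w = p
--                 break
--         out.append(w)
--     return ' '.join(out)
-- ===== Notes on version B (the rewrite author's own statement) =====
-- stated objective: faster
-- what changed: A sorts the dictionary by length and scans every root for every word; B builds a hash set of roots once and probes each word's prefixes in increasing length, returning the first (shortest) root found.
import Mathlib
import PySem

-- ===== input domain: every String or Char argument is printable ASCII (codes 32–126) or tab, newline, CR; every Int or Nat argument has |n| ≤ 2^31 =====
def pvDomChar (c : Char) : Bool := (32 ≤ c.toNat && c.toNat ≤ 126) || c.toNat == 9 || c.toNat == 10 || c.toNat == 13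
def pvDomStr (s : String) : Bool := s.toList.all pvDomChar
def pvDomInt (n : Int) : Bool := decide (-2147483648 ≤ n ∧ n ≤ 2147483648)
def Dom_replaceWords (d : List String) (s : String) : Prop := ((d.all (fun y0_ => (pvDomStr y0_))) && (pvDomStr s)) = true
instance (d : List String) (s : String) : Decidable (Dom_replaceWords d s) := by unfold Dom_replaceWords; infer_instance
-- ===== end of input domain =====

-- B replaces A's per-word scan over the length-sorted dictionary by a hash-set of
-- roots probed with the word's prefixes in increasing length (objective: faster).

-- ===== PORT A =====
def replaceWords (d : List String) (s : String) : String :=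
  let ds := PySem.List.sorted d PySem.Str.len
  let ws := PySem.Str.split₀ s
  let ws2 := (List.range ws.length).foldl
    (fun acc i => ds.foldl
      (fun acc j => if PySem.Str.startswith (acc.getD i "") j then acc.set i j else acc) acc) ws
  PySem.Str.join " " ws2

-- ===== PORT B =====
-- the inner loop of B: probe the candidate prefix lengths in increasing order,
-- breaking on the first length exceeding the word or the first root found
def pvProbe (roots : PySem.Set String) (w : String) : List Int → String
  | [] => w
  | L :: ls =>
    if PySem.Str.len w < L then w
    else if roots.contains (PySem.Str.slice w none (some L)) then
      PySem.Str.slice w none (some L)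
    else pvProbe roots w ls

def replaceWords_alt (d : List String) (s : String) : String :=
  let roots := PySem.Set.ofList d
  let lengths := PySem.List.sorted (PySem.Set.ofList (d.map PySem.Str.len)) (fun x => x)
  let out := (PySem.Str.split₀ s).foldl (fun out w => out ++ [pvProbe roots w lengths]) []
  PySem.Str.join " " out

-- ===== PRECONDITION & SPEC =====
def Spec_replaceWords (d : List String) (s : String) (out : String) : Prop := out = replaceWords_alt d s
instance (d : List String) (s : String) (out : String) : Decidable (Spec_replaceWords d s out) := by unfold Spec_replaceWords; infer_instance

-- ===== CLAIM (what is proved, stated in full; the proofs are below) =====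
def Claim_equal_replaceWords : Prop := ∀ (d : List String) (s : String), Dom_replaceWords d s → Spec_replaceWords d s (replaceWords d s)

-- ===== LEMMAS AND PROOFS =====

-- A's inner-loop body as a function of the current word
def pvStep (w j : String) : String := if PySem.Str.startswith w j then j else w

lemma pv_sw_iff (w j : String) : PySem.Str.startswith w j = true ↔ j.toList <+: w.toList := by
  rw [PySem.Str.startswith_eq]; exact PySem.Chars.startswith_iff _ _

lemma pv_len_mono (j x : String) (h : PySem.Str.len j ≤ PySem.Str.len x) :
    j.toList.length ≤ x.toList.length := by
  rw [PySem.Str.len_eq, PySem.Str.len_eq] at h; exact_mod_cast h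

-- once A has replaced a word by a root, later (≥-length) roots leave it unchanged
lemma pv_foldl_step_stay (j : String) (t : List String)
    (h : ∀ x ∈ t, PySem.Str.len j ≤ PySem.Str.len x) : t.foldl pvStep j = j := by
  induction t with
  | nil => rfl
  | cons x t ih =>
    have hstep : pvStep j x = x ∨ pvStep j x = j := by
      unfold pvStep; split_ifs <;> simp
    have hxj : pvStep j x = j := by
      unfold pvStep; split_ifs with hsw
      · have hp := (pv_sw_iff j x).mp hsw
        have h1 := hp.length_le
        have h2 := pv_len_mono j x (h x (by simp))
        exact (String.toList_inj.mp (hp.eq_of_length (by omega)))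
      · rfl
    rw [List.foldl_cons, hxj]
    exact ih (fun y hy => h y (by simp [hy]))

-- A's fold over a length-sorted dictionary returns the first (hence shortest) matching root
lemma pv_foldl_step_find (w : String) (ds : List String)
    (h : ds.Pairwise (fun a b => PySem.Str.len a ≤ PySem.Str.len b)) :
    ds.foldl pvStep w = ((ds.find? (fun j => PySem.Str.startswith w j)).getD w) := by
  induction ds with
  | nil => rfl
  | cons j t ih =>
    rw [List.pairwise_cons] at h
    rw [List.foldl_cons]
    by_cases hsw : PySem.Str.startswith w j = true
    · rw [List.find?_cons_of_pos hsw]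
      have : pvStep w j = j := by unfold pvStep; rw [if_pos hsw]
      rw [this]
      simpa using pv_foldl_step_stay j t h.1
    · rw [List.find?_cons_of_neg (by simpa using hsw)]
      have : pvStep w j = w := by unfold pvStep; rw [if_neg hsw]
      rw [this]; exact ih h.2

lemma pv_set_getD_self {α : Type} (l : List α) (i : Nat) (a : α) (hi : i < l.length) :
    l.set i (l.getD i a) = l := by
  rw [List.getD_eq_getElem?_getD, List.getElem?_eq_getElem hi]
  simp

-- A's inner loop only rewrites slot i, by folding pvStep over the dictionary
lemma pv_inner_fold (ds : List String) : ∀ (acc : List String) (i : Nat), i < acc.length →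
    ds.foldl (fun acc j => if PySem.Str.startswith (acc.getD i "") j then acc.set i j else acc) acc
      = acc.set i (ds.foldl pvStep (acc.getD i "")) := by
  induction ds with
  | nil => intro acc i hi; simpa using (pv_set_getD_self acc i "" hi).symm
  | cons j t ih =>
    intro acc i hi
    rw [List.foldl_cons, List.foldl_cons]
    by_cases h : PySem.Str.startswith (acc.getD i "") j = true
    · rw [if_pos h, ih (acc.set i j) i (by simpa using hi)]
      have hg : (acc.set i j).getD i "" = j := by
        rw [List.getD_eq_getElem?_getD, List.getElem?_set_self hi]; rfl
      rw [hg, List.set_set]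
      have : pvStep (acc.getD i "") j = j := by unfold pvStep; rw [if_pos h]
      rw [this]
    · rw [if_neg h, ih acc i hi]
      have : pvStep (acc.getD i "") j = acc.getD i "" := by unfold pvStep; rw [if_neg h]
      rw [this]

-- A's outer loop over the indices is a map
lemma pv_outer_fold (ds : List String) (ws : List String) :
    ∀ n, n ≤ ws.length →
    (List.range n).foldl
      (fun acc i => ds.foldl
        (fun acc j => if PySem.Str.startswith (acc.getD i "") j then acc.set i j else acc) acc) ws
      = (ws.take n).map (fun w => ds.foldl pvStep w) ++ ws.drop n := by
  intro n
  induction n with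
  | zero => simp
  | succ n ih =>
    intro h
    have hn : n < ws.length := by omega
    rw [List.range_succ, List.foldl_append, ih (by omega), List.foldl_cons, List.foldl_nil]
    have hlenmap : ((ws.take n).map (fun w => ds.foldl pvStep w)).length = n := by
      simp [Nat.min_eq_left (le_of_lt hn)]
    have hlen : (((ws.take n).map (fun w => ds.foldl pvStep w)) ++ ws.drop n).length = ws.length := by
      simp; omega
    rw [pv_inner_fold ds _ n (by omega)]
    have hget : (((ws.take n).map (fun w => ds.foldl pvStep w)) ++ ws.drop n).getD n "" = ws[n] := by
      rw [List.getD_eq_getElem?_getD, List.getElem?_append_right (by omega)]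
      rw [hlenmap]
      simp [List.getElem?_drop, List.getElem?_eq_getElem hn]
    rw [hget, List.set_append, if_neg (by omega), hlenmap, Nat.sub_self]
    rw [List.drop_eq_getElem_cons hn, List.set_cons_zero]
    have htk : List.take (n+1) ws = List.take n ws ++ [ws[n]] := by
      rw [List.take_add_one, List.getElem?_eq_getElem hn]; rfl
    rw [htk, List.map_append]
    simp

lemma pv_contains_iff (d : List String) (x : String) :
    (PySem.Set.ofList d).contains x = true ↔ x ∈ d := by
  have h1 : (PySem.Set.ofList d).contains x = true ↔ x ∈ PySem.Set.ofList d := by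
    simp [PySem.Set.contains]
  rw [h1, PySem.Set.mem_ofList]

lemma pv_slice_toList' (w : String) (L : Int) (h : 0 ≤ L) :
    (PySem.Str.slice w none (some L)).toList = w.toList.take L.toNat := by
  rw [PySem.Str.toList_slice, PySem.Chars.slice_eq_listSlice, PySem.List.slice_to _ h]

-- if no root is a prefix of w, B's probe leaves w unchanged
lemma pv_probe_none (d : List String) (w : String)
    (hno : ∀ x ∈ d, ¬ PySem.Str.startswith w x = true) :
    ∀ ls : List Int, (∀ L ∈ ls, 0 ≤ L) → pvProbe (PySem.Set.ofList d) w ls = w := by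
  intro ls
  induction ls with
  | nil => intro _; rfl
  | cons L ls ih =>
    intro hpos
    unfold pvProbe
    split_ifs with hbr hc
    · rfl
    · exfalso
      have hmem : PySem.Str.slice w none (some L) ∈ d := (pv_contains_iff d _).mp hc
      have hpre : (PySem.Str.slice w none (some L)).toList <+: w.toList := by
        rw [pv_slice_toList' w L (hpos L (by simp))]; exact List.take_prefix _ _
      exact hno _ hmem ((pv_sw_iff w _).mpr hpre)
    · exact ih (fun x hx => hpos x (by simp [hx]))

-- if j is the shortest prefix root, B's probe finds it at length len j
lemma pv_probe_some (d : List String) (w j : String)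
    (hjw : j.toList <+: w.toList) (hjd : j ∈ d)
    (hmin : ∀ x ∈ d, PySem.Str.startswith w x = true → j.toList.length ≤ x.toList.length) :
    ∀ ls : List Int, ls.Pairwise (· < ·) → (∀ L ∈ ls, 0 ≤ L) →
      (PySem.Str.len j) ∈ ls → pvProbe (PySem.Set.ofList d) w ls = j := by
  have hLjw : j.toList.length ≤ w.toList.length := hjw.length_le
  have htake : w.toList.take j.toList.length = j.toList := (List.prefix_iff_eq_take.mp hjw).symm
  have hsj : PySem.Str.slice w none (some (PySem.Str.len j)) = j := by
    rw [← String.toList_inj, pv_slice_toList' w _ (by rw [PySem.Str.len_eq]; positivity)]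
    rw [PySem.Str.len_eq]
    simpa using htake
  intro ls
  induction ls with
  | nil => intro _ _ h; exact absurd h (List.not_mem_nil)
  | cons L ls ih =>
    intro hpair hpos hmem
    have hLj : PySem.Str.len j = (j.toList.length : Int) := PySem.Str.len_eq j
    have hLw : PySem.Str.len w = (w.toList.length : Int) := PySem.Str.len_eq w
    rw [List.pairwise_cons] at hpair
    unfold pvProbe
    have hLLj : L = PySem.Str.len j ∨ L < PySem.Str.len j := by
      rcases List.mem_cons.mp hmem with h | h
      · left; exact h.symm
      · right; exact hpair.1 _ h
    split_ifs with hbr hc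
    · -- L > len w is impossible: L ≤ len j ≤ len w
      exfalso
      rcases hLLj with h | h <;> omega
    · -- a root of length L is a prefix: minimality forces L = len j
      have hL0 : (0:Int) ≤ L := hpos L (by simp)
      have hLlen : L.toNat ≤ w.toList.length := by omega
      have hmem' : PySem.Str.slice w none (some L) ∈ d := (pv_contains_iff d _).mp hc
      have htl : (PySem.Str.slice w none (some L)).toList = w.toList.take L.toNat :=
        pv_slice_toList' w L hL0
      have hpre : (PySem.Str.slice w none (some L)).toList <+: w.toList := by
        rw [htl]; exact List.take_prefix _ _
      have hlen' : (PySem.Str.slice w none (some L)).toList.length = L.toNat := by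
        rw [htl, List.length_take]; omega
      have h1 := hmin _ hmem' ((pv_sw_iff w _).mpr hpre)
      have hLeq : L = PySem.Str.len j := by
        rcases hLLj with h | h
        · exact h
        · exfalso; omega
      rw [hLeq, hsj]
    · -- no root has length L, so len j ≠ L; recurse
      have hne : PySem.Str.len j ≠ L := by
        intro h
        rw [← h, hsj] at hc
        exact hc ((pv_contains_iff d j).mpr hjd)
      have hmem' : PySem.Str.len j ∈ ls := by
        rcases List.mem_cons.mp hmem with h | h
        · exact absurd h hne
        · exact h
      exact ih hpair.2 (fun x hx => hpos x (by simp [hx])) hmem'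

-- the per-word equivalence: A's fold over the sorted roots = B's shortest-prefix probe
lemma pv_perWord (d : List String) (w : String) :
    (PySem.List.sorted d PySem.Str.len).foldl pvStep w
      = pvProbe (PySem.Set.ofList d) w
          (PySem.List.sorted (PySem.Set.ofList (d.map PySem.Str.len)) (fun x => x)) := by
  have hpair := PySem.List.sorted_pairwise d PySem.Str.len
  have hperm := PySem.List.sorted_perm d PySem.Str.len false
  have hmemLS : ∀ L : Int,
      L ∈ PySem.List.sorted (PySem.Set.ofList (d.map PySem.Str.len)) (fun x => x)
        ↔ ∃ r ∈ d, PySem.Str.len r = L := by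
    intro L
    rw [PySem.List.mem_sorted, PySem.Set.mem_ofList, List.mem_map]
  have hpos : ∀ L ∈ PySem.List.sorted (PySem.Set.ofList (d.map PySem.Str.len)) (fun x => x),
      (0:Int) ≤ L := by
    intro L hL
    obtain ⟨r, _, hr⟩ := (hmemLS L).mp hL
    rw [← hr, PySem.Str.len_eq]
    positivity
  have hinc : (PySem.List.sorted (PySem.Set.ofList (d.map PySem.Str.len))
      (fun x => x)).Pairwise (· < ·) := PySem.List.sorted_ofList_pairwise_lt _
  rw [pv_foldl_step_find w _ hpair]
  rcases hfd : (PySem.List.sorted d PySem.Str.len).find? (fun j => PySem.Str.startswith w j)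
    with _ | j
  · -- no root is a prefix of w
    have hno : ∀ x ∈ d, ¬ PySem.Str.startswith w x = true := by
      intro x hx
      exact List.find?_eq_none.mp hfd x (hperm.mem_iff.mpr hx)
    rw [pv_probe_none d w hno _ hpos]
    rfl
  · -- j = the first match in the length-sorted list = the shortest prefix root
    obtain ⟨hpj, as, bs, hds, hfail⟩ := List.find?_eq_some_iff_append.mp hfd
    have hjw : j.toList <+: w.toList := (pv_sw_iff w j).mp hpj
    have hjd : j ∈ d := hperm.mem_iff.mp (List.mem_of_find?_eq_some hfd)
    have hmin : ∀ x ∈ d, PySem.Str.startswith w x = true → j.toList.length ≤ x.toList.length := by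
      intro x hx hswx
      have hxds : x ∈ as ++ j :: bs := by rw [← hds]; exact hperm.mem_iff.mpr hx
      rcases List.mem_append.mp hxds with hxa | hxjb
      · exact absurd hswx (by simpa using hfail x hxa)
      · rcases List.mem_cons.mp hxjb with rfl | hxb
        · exact le_refl _
        · have hp2 := hpair
          rw [hds, List.pairwise_append] at hp2
          exact pv_len_mono j x ((List.pairwise_cons.mp hp2.2.1).1 x hxb)
    rw [pv_probe_some d w j hjw hjd hmin _ hinc hpos ((hmemLS _).mpr ⟨j, hjd, rfl⟩)]
    rfl

-- ===== VERDICT (by name: the statement is the Claim_ definition above) =====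
theorem replaceWords_spec : Claim_equal_replaceWords := by
  intro d s _
  show PySem.Str.join " "
      ((List.range (PySem.Str.split₀ s).length).foldl
        (fun acc i => (PySem.List.sorted d PySem.Str.len).foldl
          (fun acc j => if PySem.Str.startswith (acc.getD i "") j then acc.set i j else acc) acc)
        (PySem.Str.split₀ s))
    = PySem.Str.join " "
        ((PySem.Str.split₀ s).foldl
          (fun out w => out ++ [pvProbe (PySem.Set.ofList d) w
            (PySem.List.sorted (PySem.Set.ofList (d.map PySem.Str.len)) (fun x => x))]) [])
  rw [pv_outer_fold _ _ _ (le_refl (PySem.Str.split₀ s).length)]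
  rw [PySem.List.foldl_append_singleton_eq_map]
  simp only [List.take_length, List.drop_length, List.append_nil, List.nil_append]
  congr 1
  exact List.map_congr_left (fun w _ => pv_perWord d w)
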